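-- pv_equiv track=rewrite | github.com/MAAREKANTONY/finance_momet_ch | core/tests/test_engine_and_metrics.py | apply_signal_events_to_latch_state
-- ===== SOURCE A (Python) =====
-- def apply_signal_events_to_latch_state(state: dict[str, bool], events: set[str]) -> dict[str, bool]:
--     """Pure spec helper for the target latch model used by tests only."""
--     updated = dict(state)
--     grouped: dict[str, set[str]] = {}
--     for raw_event in events:
--         event = str(raw_event or "").strip().upper()
--         if len(event) < 2 or event[-1] not in {"+", "-"}:
--             continue
--         grouped.setdefault(event[:-1], set()).add(event[-1])
--
--     for signal_id, polarities in grouped.items():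
--         if "+" in polarities and "-" in polarities:
--             updated[signal_id] = False
--         elif "+" in polarities:
--             updated[signal_id] = True
--         elif "-" in polarities:
--             updated[signal_id] = False
--     return updated
-- ===== SOURCE B (Python) =====
-- def _parse(raw):
--     ev = str(raw or "").strip().upper()
--     if len(ev) >= 2 and ev[-1] in "+-":
--         return ev[:-1], ev[-1]
--     return None
--
--
-- def apply_signal_events_to_latch_state(state, events):
--     parsed = [pe for pe in map(_parse, events) if pe is not None]
--     minus = {i for i, p in parsed if p == "-"}
--     updated = dict(state)
--     seen = set()
--     for i, _ in parsed:
--         if i not in seen: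
--             seen.add(i)
--             updated[i] = i not in minus
--     return updated
-- ===== Notes on version B (the rewrite author's own statement) =====
-- stated objective: simpler
-- what changed: B drops A's grouped dict of per-signal polarity sets and its three-way branch: it parses events once into (id, polarity) pairs, builds the set of ids with a '-' event, and in one seen-filtered pass latches each id to (id not in minus).
import Mathlib
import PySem

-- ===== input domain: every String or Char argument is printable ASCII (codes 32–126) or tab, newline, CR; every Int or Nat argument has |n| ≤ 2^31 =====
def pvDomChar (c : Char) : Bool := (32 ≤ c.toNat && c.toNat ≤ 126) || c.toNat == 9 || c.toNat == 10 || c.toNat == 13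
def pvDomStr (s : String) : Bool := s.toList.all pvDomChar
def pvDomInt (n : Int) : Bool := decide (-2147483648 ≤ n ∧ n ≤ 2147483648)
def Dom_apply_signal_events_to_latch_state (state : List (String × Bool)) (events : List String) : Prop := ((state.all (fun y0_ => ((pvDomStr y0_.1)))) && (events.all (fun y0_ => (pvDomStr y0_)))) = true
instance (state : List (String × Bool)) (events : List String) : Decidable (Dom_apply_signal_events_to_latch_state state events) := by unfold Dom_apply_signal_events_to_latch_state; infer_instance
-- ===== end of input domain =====

-- B replaces A's grouped polarity-set dict and three-way branch by a single seen-filtered pass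
-- that writes updated[id] = (id not in minus); same return value, same insertion order.

-- ===== PORT A =====
-- A's first loop body: normalize the event, skip invalid ones, group the polarity char by signal id.
def pvAGroupStep (g : PySem.Dict String (PySem.Set Char)) (raw : String) : PySem.Dict String (PySem.Set Char) :=
  let event := PySem.Chars.upper (PySem.Chars.strip raw.toList)
  if event.length < 2 ∨ ¬ (event.getLast? = some '+' ∨ event.getLast? = some '-') then g
  else
    let key := String.mk event.dropLast
    g.insert key (PySem.Set.add (g.getD key []) ((event.getLast?).getD ' '))

-- A's second loop body: the three-way branch on the polarity set.
def pvALatchStep (u : PySem.Dict String Bool) (kp : String × PySem.Set Char) : PySem.Dict String Bool :=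
  if kp.2.contains '+' && kp.2.contains '-' then u.insert kp.1 false
  else if kp.2.contains '+' then u.insert kp.1 true
  else if kp.2.contains '-' then u.insert kp.1 false
  else u

def apply_signal_events_to_latch_state (state : List (String × Bool)) (events : List String) : List (String × Bool) :=
  let updated : PySem.Dict String Bool := PySem.Dict.ofList state
  let grouped : PySem.Dict String (PySem.Set Char) := events.foldl pvAGroupStep PySem.Dict.empty
  (grouped.items.foldl pvALatchStep updated).items

-- ===== PORT B =====
-- Source B's _parse: normalize and split a raw event into (signal id, polarity char), or None.
def pvParse (raw : String) : Option (String × Char) :=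
  let ev := PySem.Chars.upper (PySem.Chars.strip raw.toList)
  match ev.getLast? with
  | some c => if 2 ≤ ev.length ∧ (c = '+' ∨ c = '-') then some (String.mk ev.dropLast, c) else none
  | none => none

-- Source B's loop body: on the first occurrence of a signal id, latch it to (id not in minus).
def pvBStep (minus : PySem.Set String) (su : PySem.Set String × PySem.Dict String Bool)
    (ip : String × Char) : PySem.Set String × PySem.Dict String Bool :=
  if su.1.contains ip.1 then su
  else (PySem.Set.add su.1 ip.1, su.2.insert ip.1 (!minus.contains ip.1))

def apply_signal_events_to_latch_state_alt (state : List (String × Bool)) (events : List String) : List (String × Bool) :=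
  let parsed := events.filterMap pvParse
  let minus : PySem.Set String := PySem.Set.ofList ((parsed.filter (fun ip => ip.2 == '-')).map (·.1))
  let updated : PySem.Dict String Bool := PySem.Dict.ofList state
  ((parsed.foldl (pvBStep minus) (PySem.Set.empty, updated)).2).items

-- ===== PRECONDITION & SPEC =====
def Spec_apply_signal_events_to_latch_state (state : List (String × Bool)) (events : List String) (out : List (String × Bool)) : Prop := out = apply_signal_events_to_latch_state_alt state events
instance (state : List (String × Bool)) (events : List String) (out : List (String × Bool)) : Decidable (Spec_apply_signal_events_to_latch_state state events out) := by unfold Spec_apply_signal_events_to_latch_state; infer_instance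

-- ===== CLAIM (what is proved, stated in full; the proofs are below) =====
def Claim_equal_apply_signal_events_to_latch_state : Prop := ∀ (state : List (String × Bool)) (events : List String), Dom_apply_signal_events_to_latch_state state events → Spec_apply_signal_events_to_latch_state state events (apply_signal_events_to_latch_state state events)

-- ===== LEMMAS AND PROOFS =====

-- the canonical per-signal latch value: false iff some '-' event names the signal
def pvV (L : List (String × Char)) (k : String) : Bool := !decide ((k, '-') ∈ L)

-- the canonical application loop both ports reduce to
def pvApply (v : String → Bool) (u : PySem.Dict String Bool) (ks : List String) : PySem.Dict String Bool :=
  ks.foldl (fun u k => u.insert k (v k)) u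

-- A's grouping step on an already-parsed pair
def pvGStep (g : PySem.Dict String (PySem.Set Char)) (kc : String × Char) : PySem.Dict String (PySem.Set Char) :=
  g.insert kc.1 (PySem.Set.add (g.getD kc.1 []) kc.2)

-- the ids B's seen-filter lets through, in order
def pvNewFirsts (seen : PySem.Set String) : List (String × Char) → List String
  | [] => []
  | ip :: L => if seen.contains ip.1 then pvNewFirsts seen L
               else ip.1 :: pvNewFirsts (PySem.Set.add seen ip.1) L

lemma pvAGroupStep_eq_parse (g : PySem.Dict String (PySem.Set Char)) (raw : String) :
    pvAGroupStep g raw = match pvParse raw with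
      | none => g
      | some kc => pvGStep g kc := by
  unfold pvAGroupStep pvParse pvGStep
  set ev := PySem.Chars.upper (PySem.Chars.strip raw.toList) with hev
  rcases hl : ev.getLast? with _ | c
  · have h0 : ev = [] := List.getLast?_eq_none_iff.mp hl
    simp only [hl]
    rw [if_pos (Or.inl (by rw [h0]; simp))]
  · simp only [hl]
    by_cases h2 : 2 ≤ ev.length ∧ (c = '+' ∨ c = '-')
    · rw [if_neg, if_pos h2]
      · simp
      · rintro (hlt | hns)
        · omega
        · apply hns
          rcases h2.2 with hc | hc
          · exact Or.inl (by simp [hl, hc])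
          · exact Or.inr (by simp [hl, hc])
    · rw [if_neg h2, if_pos]
      by_cases hlen2 : 2 ≤ ev.length
      · refine Or.inr ?_
        rintro (hp | hp)
        · simp only [hl, Option.some.injEq] at hp
          exact h2 ⟨hlen2, Or.inl hp⟩
        · simp only [hl, Option.some.injEq] at hp
          exact h2 ⟨hlen2, Or.inr hp⟩
      · exact Or.inl (by omega)
lemma pvAfold_eq (l : List String) (g : PySem.Dict String (PySem.Set Char)) :
    l.foldl pvAGroupStep g = (l.filterMap pvParse).foldl pvGStep g := by
  induction l generalizing g with
  | nil => rfl
  | cons raw t ih =>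
    rw [List.foldl_cons, List.filterMap_cons]
    rcases hp : pvParse raw with _ | kc
    · rw [ih, pvAGroupStep_eq_parse, hp]
    · rw [ih, pvAGroupStep_eq_parse, hp, List.foldl_cons]

lemma pvGetD_G (L : List (String × Char)) (g : PySem.Dict String (PySem.Set Char)) (k : String) :
    (L.foldl pvGStep g).getD k [] =
      PySem.Set.update (g.getD k []) ((L.filter (fun kc => kc.1 == k)).map (·.2)) := by
  induction L generalizing g with
  | nil => simp [PySem.Set.update]
  | cons kc t ih =>
    rw [List.foldl_cons, ih]
    by_cases hk : kc.1 = k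
    · simp [pvGStep, List.filter_cons, hk, PySem.Dict.getD_insert_self, PySem.Set.update]
    · have : k ≠ kc.1 := fun h => hk h.symm
      simp [pvGStep, List.filter_cons, hk, PySem.Dict.getD_insert_of_ne _ _ _ this]

lemma pvB_loop (minus : PySem.Set String) (L : List (String × Char)) (seen : PySem.Set String)
    (u : PySem.Dict String Bool) :
    (L.foldl (pvBStep minus) (seen, u)).2 = pvApply (fun k => !minus.contains k) u (pvNewFirsts seen L) := by
  induction L generalizing seen u with
  | nil => rfl
  | cons ip t ih =>
    rw [List.foldl_cons]
    by_cases h : ip.1 ∈ seen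
    · have hb : pvBStep minus (seen, u) ip = (seen, u) := by simp [pvBStep, h]
      have hn : pvNewFirsts seen (ip :: t) = pvNewFirsts seen t := by simp [pvNewFirsts, h]
      rw [hb, ih, hn]
    · have hb : pvBStep minus (seen, u) ip
          = (PySem.Set.add seen ip.1, u.insert ip.1 (!minus.contains ip.1)) := by
        simp [pvBStep, h]
      have hn : pvNewFirsts seen (ip :: t) = ip.1 :: pvNewFirsts (PySem.Set.add seen ip.1) t := by
        simp [pvNewFirsts, h]
      rw [hb, ih, hn]
      rfl
lemma pvNewFirsts_update (L : List (String × Char)) (seen : PySem.Set String) :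
    seen ++ pvNewFirsts seen L = PySem.Set.update seen (L.map (·.1)) := by
  induction L generalizing seen with
  | nil => simp [pvNewFirsts, PySem.Set.update]
  | cons ip t ih =>
    simp only [List.map_cons, PySem.Set.update, List.foldl_cons]
    by_cases h : ip.1 ∈ seen
    · have hadd : PySem.Set.add seen ip.1 = seen := by simp [PySem.Set.add, h]
      have hn : pvNewFirsts seen (ip :: t) = pvNewFirsts seen t := by simp [pvNewFirsts, h]
      rw [hn, hadd]
      simpa [PySem.Set.update] using ih seen
    · have hadd : PySem.Set.add seen ip.1 = seen ++ [ip.1] := by simp [PySem.Set.add, h]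
      have hn : pvNewFirsts seen (ip :: t) = ip.1 :: pvNewFirsts (PySem.Set.add seen ip.1) t := by
        simp [pvNewFirsts, h]
      rw [hn]
      have h2 := ih (PySem.Set.add seen ip.1)
      simp only [PySem.Set.update] at h2
      rw [hadd] at h2 ⊢
      rw [← h2]
      simp
lemma pvMinus_contains (L : List (String × Char)) (k : String) :
    (PySem.Set.ofList ((L.filter (fun ip => ip.2 == '-')).map (·.1)) : PySem.Set String).contains k
      = !(pvV L k) := by
  have hmemiff : k ∈ ((L.filter (fun ip => ip.2 == '-')).map (·.1)) ↔ (k, '-') ∈ L := by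
    constructor
    · intro h
      rcases List.mem_map.mp h with ⟨ip, hip, hfst⟩
      rcases List.mem_filter.mp hip with ⟨hm, hpolf⟩
      rcases ip with ⟨a, b⟩
      simp at hfst hpolf
      rw [← hfst, ← hpolf] at *
      exact hm
    · intro h
      exact List.mem_map.mpr ⟨(k, '-'), List.mem_filter.mpr ⟨h, by simp⟩, rfl⟩
  simp [pvV, PySem.Set.contains, List.contains_eq_mem, PySem.Set.mem_ofList, hmemiff]
lemma pvA_apply (L : List (String × Char)) (u : PySem.Dict String Bool)
    (hpol : ∀ kc ∈ L, kc.2 = '+' ∨ kc.2 = '-') :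
    (L.foldl pvGStep PySem.Dict.empty).items.foldl pvALatchStep u
      = pvApply (pvV L) u (PySem.Set.ofList (L.map (·.1))) := by
  have hfold : L.foldl pvGStep PySem.Dict.empty
      = L.foldl (fun d x => d.insert ((·.1) x) ((fun (d : PySem.Dict String (PySem.Set Char)) (x : String × Char) => PySem.Set.add (d.getD x.1 []) x.2) d x)) PySem.Dict.empty := rfl
  have hkeys : (L.foldl pvGStep PySem.Dict.empty).keys = PySem.Set.ofList (L.map (·.1)) := by
    rw [hfold, PySem.Dict.keys_foldl_insert_key]
    simp [PySem.Set.ofList_eq_foldl, PySem.Set.update, PySem.Dict.keys_empty]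
  have hnd : (L.foldl pvGStep PySem.Dict.empty).keys.Nodup := by
    rw [hfold]
    exact PySem.Dict.nodup_keys_foldl_insert_key _ _ _ _ (by simp [PySem.Dict.keys_empty])
  rw [PySem.Dict.items_eq_map_keys _ hnd [], hkeys, List.foldl_map]
  apply PySem.List.foldl_congr_mem
  intro acc k hk
  rw [PySem.Set.mem_ofList] at hk
  have hgetD : (L.foldl pvGStep PySem.Dict.empty).getD k []
      = PySem.Set.ofList ((L.filter (fun kc => kc.1 == k)).map (·.2)) := by
    rw [pvGetD_G]
    simp [PySem.Dict.getD_empty, PySem.Set.ofList_eq_foldl, PySem.Set.update]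
  rw [hgetD]
  set pols := (L.filter (fun kc => kc.1 == k)).map (·.2) with hpols
  by_cases hm : (k, '-') ∈ L
  · have hminusm : '-' ∈ pols := by
      rw [hpols]
      exact List.mem_map.mpr ⟨(k, '-'), List.mem_filter.mpr ⟨hm, by simp⟩, rfl⟩
    have hv : pvV L k = false := by simp [pvV, hm]
    by_cases hpm : '+' ∈ pols
    · simp [pvALatchStep, PySem.Set.contains, List.contains_eq_mem, PySem.Set.mem_ofList, hpm, hminusm, hv]
    · simp [pvALatchStep, PySem.Set.contains, List.contains_eq_mem, PySem.Set.mem_ofList, hpm, hminusm, hv]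
  · have hminusm : '-' ∉ pols := by
      rw [hpols]
      intro hmem
      rcases List.mem_map.mp hmem with ⟨ip, hip, hsnd⟩
      rcases List.mem_filter.mp hip with ⟨hmemL, hfst⟩
      apply hm
      rcases ip with ⟨a, b⟩
      simp at hfst hsnd
      rw [← hfst, ← hsnd] at *
      exact hmemL
    rcases List.mem_map.mp hk with ⟨ip, hipL, hfst⟩
    have hplusm : '+' ∈ pols := by
      rcases hpol ip hipL with hp | hp
      · rw [hpols]
        exact List.mem_map.mpr ⟨ip, List.mem_filter.mpr ⟨hipL, by simp [hfst]⟩, hp⟩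
      · exfalso
        apply hm
        rcases ip with ⟨a, b⟩
        simp at hfst hp
        rw [← hfst, ← hp] at *
        exact hipL
    have hv : pvV L k = true := by simp [pvV, hm]
    simp [pvALatchStep, PySem.Set.contains, List.contains_eq_mem, PySem.Set.mem_ofList, hplusm, hminusm, hv]
lemma pvParse_pol (raw : String) (kc : String × Char) (h : pvParse raw = some kc) :
    kc.2 = '+' ∨ kc.2 = '-' := by
  unfold pvParse at h
  set ev := PySem.Chars.upper (PySem.Chars.strip raw.toList) with hev
  rcases hl : ev.getLast? with _ | c <;> simp [hl] at h
  rcases h with ⟨⟨_, hc⟩, hkc⟩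
  rw [← hkc]
  exact hc

-- ===== VERDICT (by name: the statement is the Claim_ definition above) =====
theorem apply_signal_events_to_latch_state_spec : Claim_equal_apply_signal_events_to_latch_state := by
  intro state events _
  unfold Spec_apply_signal_events_to_latch_state
  unfold apply_signal_events_to_latch_state apply_signal_events_to_latch_state_alt
  simp only [pvAfold_eq]
  set L := events.filterMap pvParse with hL
  have hpol : ∀ kc ∈ L, kc.2 = '+' ∨ kc.2 = '-' := by
    intro kc hkc
    rw [hL] at hkc
    rcases List.mem_filterMap.mp hkc with ⟨raw, _, hp⟩
    exact pvParse_pol raw kc hp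
  have hvfun : (fun k => !(PySem.Set.ofList ((L.filter (fun ip => ip.2 == '-')).map (·.1)) : PySem.Set String).contains k) = pvV L := by
    funext k
    rw [pvMinus_contains L k]
    simp
  have hks : pvNewFirsts PySem.Set.empty L = PySem.Set.ofList (L.map (·.1)) := by
    have h0 := pvNewFirsts_update L PySem.Set.empty
    simpa [PySem.Set.empty, PySem.Set.ofList_eq_foldl, PySem.Set.update] using h0
  rw [pvA_apply L _ hpol, pvB_loop, hvfun, hks]
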